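-- pv_equiv track=rewrite | github.com/Hansilverline/Algorithm-basic-100 | basic_3.py | solution
-- ===== SOURCE A (Python) =====
-- def solution(data):
--     if not data :
--         return 0
--     sum = 0
--     for i in data :
--         if not(i%3 == 0 or i%5 == 0) :
--             sum += i
--     return sum
-- ===== SOURCE B (Python) =====
-- def solution(data):
--     total = sum(data)
--     d3 = sum(x for x in data if x % 3 == 0)
--     d5 = sum(x for x in data if x % 5 == 0)
--     d15 = sum(x for x in data if x % 15 == 0)
--     return total - d3 - d5 + d15
-- ===== Notes on version B (the rewrite author's own statement) =====
-- stated objective: alternative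
-- what changed: Replaces the filtered single-pass accumulation with inclusion-exclusion: total sum minus sums of multiples of 3 and 5 plus multiples of 15.
import Mathlib
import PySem

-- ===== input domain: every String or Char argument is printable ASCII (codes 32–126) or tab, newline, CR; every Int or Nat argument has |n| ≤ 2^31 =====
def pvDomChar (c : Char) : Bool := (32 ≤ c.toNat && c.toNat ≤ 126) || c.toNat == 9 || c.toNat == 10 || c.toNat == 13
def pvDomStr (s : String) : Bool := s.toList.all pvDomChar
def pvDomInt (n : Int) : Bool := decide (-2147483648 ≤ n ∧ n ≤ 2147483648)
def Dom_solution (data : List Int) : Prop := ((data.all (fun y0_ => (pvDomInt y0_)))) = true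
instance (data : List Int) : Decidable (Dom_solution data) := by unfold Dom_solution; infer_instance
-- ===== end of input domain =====

-- B replaces A's filtered single-pass accumulation with inclusion-exclusion (total - div3 - div5 + div15); alternative decomposition, same cost.


-- ===== PORT A =====
def solution (data : List Int) : Int :=
  if data = [] then 0
  else data.foldl (fun s i => if ¬(PySem.Int.mod i 3 == 0 || PySem.Int.mod i 5 == 0) then s + i else s) 0

-- ===== PORT B =====
def solution_alt (data : List Int) : Int :=
  let total := data.sum
  let d3 := ((data.filter (fun x => PySem.Int.mod x 3 == 0)).sum)
  let d5 := ((data.filter (fun x => PySem.Int.mod x 5 == 0)).sum)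
  let d15 := ((data.filter (fun x => PySem.Int.mod x 15 == 0)).sum)
  total - d3 - d5 + d15

-- ===== PRECONDITION & SPEC =====
def Spec_solution (data : List Int) (out : Int) : Prop := out = solution_alt data
instance (data : List Int) (out : Int) : Decidable (Spec_solution data out) := by unfold Spec_solution; infer_instance

-- ===== CLAIM (what is proved, stated in full; the proofs are below) =====
def Claim_equal_solution : Prop := ∀ (data : List Int), Dom_solution data → Spec_solution data (solution data)

-- ===== LEMMAS AND PROOFS =====

-- ===== VERDICT (by name: the statement is the Claim_ definition above) =====
lemma foldl_shift (data : List Int) (f : Int → Bool) (a : Int) :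
    data.foldl (fun s i => if ¬ f i then s + i else s) a
      = a + data.foldl (fun s i => if ¬ f i then s + i else s) 0 := by
  induction data generalizing a with
  | nil => simp
  | cons x xs ih =>
    simp only [List.foldl_cons]
    rw [ih, ih (if ¬ f x then 0 + x else 0)]
    split <;> ring

lemma key (data : List Int) :
    data.foldl (fun s i => if ¬(PySem.Int.mod i 3 == 0 || PySem.Int.mod i 5 == 0) then s + i else s) 0
      = data.sum
        - ((data.filter (fun x => PySem.Int.mod x 3 == 0)).sum)
        - ((data.filter (fun x => PySem.Int.mod x 5 == 0)).sum)
        + ((data.filter (fun x => PySem.Int.mod x 15 == 0)).sum) := by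
  induction data with
  | nil => simp
  | cons x xs ih =>
    simp only [List.foldl_cons, List.filter_cons, List.sum_cons]
    rw [foldl_shift, ih]
    by_cases h3 : (3:Int) ∣ x <;> by_cases h5 : (5:Int) ∣ x
    · have h15 : (15:Int) ∣ x := by omega
      simp [h3, h5, h15]; ring
    · have h15 : ¬ (15:Int) ∣ x := by omega
      simp [h3, h5, h15]
    · have h15 : ¬ (15:Int) ∣ x := by omega
      simp [h3, h5, h15]; ring
    · have h15 : ¬ (15:Int) ∣ x := by omega
      simp [h3, h5, h15]; ring

theorem solution_spec : Claim_equal_solution := by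
  intro data _
  unfold Spec_solution solution solution_alt
  split
  · subst ‹data = []›; simp
  · exact key data
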